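-- pv_equiv track=rewrite | github.com/jianyingzhihe/tca-reasoning | circuit_tracer_vlm/scripts/research/run_batch_eval.py | _parse_ids_from_notes
-- ===== SOURCE A (Python) =====
-- def _parse_ids_from_notes(notes: str) -> tuple[str, str]:
--     qid = ""
--     image_id = ""
--     if not notes:
--         return qid, image_id
--     for part in notes.split(";"):
--         s = part.strip()
--         if s.startswith("qid="):
--             qid = s.split("=", 1)[1].strip()
--         elif s.startswith("image_id="):
--             image_id = s.split("=", 1)[1].strip()
--     return qid, image_id
-- ===== SOURCE B (Python) =====
-- def _extract_last(parts, prefix):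
--     for part in reversed(parts):
--         s = part.strip()
--         if s.startswith(prefix):
--             return s.split("=", 1)[1].strip()
--     return ""
--
-- def _parse_ids_from_notes(notes: str) -> tuple[str, str]:
--     parts = notes.split(";")
--     return _extract_last(parts, "qid="), _extract_last(parts, "image_id=")
-- ===== Notes on version B (the rewrite author's own statement) =====
-- stated objective: simpler
-- what changed: A makes one forward pass over the parts, threading two accumulator variables so the last match wins; B instead runs two independent backward searches, each returning the value of the first matching part from the end, and drops the special-case early return for empty notes (which the search handles naturally).
import Mathlib
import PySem

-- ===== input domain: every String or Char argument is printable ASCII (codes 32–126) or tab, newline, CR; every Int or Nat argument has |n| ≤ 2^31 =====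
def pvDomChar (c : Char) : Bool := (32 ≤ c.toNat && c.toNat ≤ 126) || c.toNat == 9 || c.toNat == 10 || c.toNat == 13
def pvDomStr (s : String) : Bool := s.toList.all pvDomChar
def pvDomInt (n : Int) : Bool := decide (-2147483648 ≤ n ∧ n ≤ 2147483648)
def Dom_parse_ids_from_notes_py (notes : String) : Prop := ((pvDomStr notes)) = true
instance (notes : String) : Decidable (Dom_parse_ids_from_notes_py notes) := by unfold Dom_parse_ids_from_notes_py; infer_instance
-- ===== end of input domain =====

-- B replaces A's single forward pass threading two accumulator variables (last match wins)
-- by two independent backward searches, each returning the first matching part from the end,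
-- and drops the special-case early return for empty notes (objective: simpler).

-- ===== PORT A =====
def parse_ids_from_notes_py (notes : String) : String × String :=
  if notes = "" then ("", "")
  else
    ((PySem.Str.split? notes ";").getD []).foldl (fun acc part =>
      let s := PySem.Str.strip part
      if PySem.Str.startswith s "qid=" then
        (PySem.Str.strip (((PySem.Str.splitMax? s "=" 1).getD []).getD 1 ""), acc.2)
      else if PySem.Str.startswith s "image_id=" then
        (acc.1, PySem.Str.strip (((PySem.Str.splitMax? s "=" 1).getD []).getD 1 ""))
      else acc) ("", "")

-- ===== PORT B =====
-- Python's `for part in reversed(parts): … return …` becomes structural recursion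
-- over `parts.reverse`.
def pv_extract_last (rev : List String) (prefixS : String) : String :=
  match rev with
  | [] => ""
  | part :: rest =>
      let s := PySem.Str.strip part
      if PySem.Str.startswith s prefixS then
        PySem.Str.strip (((PySem.Str.splitMax? s "=" 1).getD []).getD 1 "")
      else pv_extract_last rest prefixS

def parse_ids_from_notes_py_alt (notes : String) : String × String :=
  let parts := (PySem.Str.split? notes ";").getD []
  (pv_extract_last parts.reverse "qid=", pv_extract_last parts.reverse "image_id=")

-- ===== PRECONDITION & SPEC =====
def Spec_parse_ids_from_notes_py (notes : String) (out : String × String) : Prop := out = parse_ids_from_notes_py_alt notes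
instance (notes : String) (out : String × String) : Decidable (Spec_parse_ids_from_notes_py notes out) := by unfold Spec_parse_ids_from_notes_py; infer_instance

-- ===== CLAIM (what is proved, stated in full; the proofs are below) =====
def Claim_equal_parse_ids_from_notes_py : Prop := ∀ (notes : String), Dom_parse_ids_from_notes_py notes → Spec_parse_ids_from_notes_py notes (parse_ids_from_notes_py notes)

-- ===== LEMMAS AND PROOFS =====

-- Optional-valued backward search: first match scanning the given (already reversed) list.
def pvExO (prefixS : String) : List String → Option String
  | [] => none
  | part :: rest =>
      let s := PySem.Str.strip part
      if PySem.Str.startswith s prefixS then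
        some (PySem.Str.strip (((PySem.Str.splitMax? s "=" 1).getD []).getD 1 ""))
      else pvExO prefixS rest

theorem pv_extract_eq_exO (prefixS : String) (rev : List String) :
    pv_extract_last rev prefixS = (pvExO prefixS rev).getD "" := by
  induction rev with
  | nil => rfl
  | cons p r ih =>
      simp only [pv_extract_last, pvExO]
      split
      · rfl
      · exact ih

theorem pv_exO_append_singleton (prefixS : String) (l : List String) (p : String) :
    pvExO prefixS (l ++ [p]) =
      match pvExO prefixS l with
      | some v => some v
      | none => pvExO prefixS [p] := by
  induction l with
  | nil => rfl
  | cons q r ih =>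
      simp only [List.cons_append, pvExO]
      split
      · rfl
      · exact ih

theorem pv_not_both (s : String) (h1 : PySem.Str.startswith s "qid=" = true)
    (h2 : PySem.Str.startswith s "image_id=" = true) : False := by
  rw [PySem.Str.startswith_eq, PySem.Chars.startswith_iff] at h1 h2
  obtain ⟨r1, e1⟩ := h1
  obtain ⟨r2, e2⟩ := h2
  rw [← e1] at e2
  simp [show ("qid=" : String).toList = ['q','i','d','='] from rfl,
        show ("image_id=" : String).toList = ['i','m','a','g','e','_','i','d','='] from rfl] at e2

theorem pv_main (L : List String) : ∀ (acc : String × String),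
    L.foldl (fun acc part =>
      let s := PySem.Str.strip part
      if PySem.Str.startswith s "qid=" then
        (PySem.Str.strip (((PySem.Str.splitMax? s "=" 1).getD []).getD 1 ""), acc.2)
      else if PySem.Str.startswith s "image_id=" then
        (acc.1, PySem.Str.strip (((PySem.Str.splitMax? s "=" 1).getD []).getD 1 ""))
      else acc) acc =
    ((pvExO "qid=" L.reverse).getD acc.1, (pvExO "image_id=" L.reverse).getD acc.2) := by
  induction L with
  | nil => intro acc; simp [pvExO]
  | cons p rest ih =>
      intro acc
      rw [List.foldl_cons, ih]
      rw [List.reverse_cons, pv_exO_append_singleton, pv_exO_append_singleton]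
      cases hq : PySem.Str.startswith (PySem.Str.strip p) "qid=" with
      | true =>
          have hi : PySem.Str.startswith (PySem.Str.strip p) "image_id=" = false := by
            cases h : PySem.Str.startswith (PySem.Str.strip p) "image_id="
            · rfl
            · exact absurd (pv_not_both _ hq h) (fun f => f)
          simp only [pvExO, hq, hi]
          cases pvExO "qid=" rest.reverse <;> cases pvExO "image_id=" rest.reverse <;> simp
      | false =>
          cases hi : PySem.Str.startswith (PySem.Str.strip p) "image_id=" with
          | true =>
              simp only [pvExO, hq, hi]
              cases pvExO "qid=" rest.reverse <;> cases pvExO "image_id=" rest.reverse <;> simp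
          | false =>
              simp only [pvExO, hq, hi]
              cases pvExO "qid=" rest.reverse <;> cases pvExO "image_id=" rest.reverse <;> simp

-- ===== VERDICT (by name: the statement is the Claim_ definition above) =====
theorem parse_ids_from_notes_py_spec : Claim_equal_parse_ids_from_notes_py := by
  intro notes _
  unfold Spec_parse_ids_from_notes_py parse_ids_from_notes_py parse_ids_from_notes_py_alt
  by_cases h : notes = ""
  · subst h
    show (("" : String), ("" : String)) = _
    rw [show (PySem.Str.split? "" ";").getD [] = [""] from rfl]
    rfl
  · rw [if_neg h, pv_main]
    simp only [pv_extract_eq_exO]
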